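-- pv_equiv track=rewrite | github.com/silviudr/accesibility-ai | src/ingestion/pipelines/build_vector_store.py | partition_language_columns
-- ===== SOURCE A (Python) =====
-- from typing import Dict, List, Sequence
--
-- LANG_SUFFIX_MAP: Dict[str, Sequence[str]] = {
--     "en": ("_en", "_english"),
--     "fr": ("_fr", "_french"),
-- }
--
-- def partition_language_columns(columns: Sequence[str]) -> tuple[Dict[str, List[str]], List[str]]:
--     lang_columns: Dict[str, List[str]] = {lang: [] for lang in LANG_SUFFIX_MAP}
--     shared: List[str] = []
--     for column in columns:
--         matched = False
--         for lang, suffixes in LANG_SUFFIX_MAP.items():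
--             if any(column.endswith(suffix) for suffix in suffixes):
--                 lang_columns[lang].append(column)
--                 matched = True
--                 break
--         if not matched:
--             shared.append(column)
--     return lang_columns, shared
-- ===== SOURCE B (Python) =====
-- from typing import Dict, List, Sequence
--
-- LANG_SUFFIX_MAP: Dict[str, Sequence[str]] = {
--     "en": ("_en", "_english"),
--     "fr": ("_fr", "_french"),
-- }
--
-- def partition_language_columns(columns: Sequence[str]) -> tuple[Dict[str, List[str]], List[str]]:
--     lang_columns = {
--         lang: [c for c in columns if any(c.endswith(s) for s in suffixes)]
--         for lang, suffixes in LANG_SUFFIX_MAP.items()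
--     }
--     matched = {c for cols in lang_columns.values() for c in cols}
--     shared = [c for c in columns if c not in matched]
--     return lang_columns, shared
-- ===== Notes on version B (the rewrite author's own statement) =====
-- stated objective: simpler
-- what changed: Replaces the single interleaved pass with first-match-break and a mutable dict by one filtered comprehension per language plus a separate order-preserving shared pass excluding the matched set (valid because no column can end with suffixes of two languages).
import Mathlib
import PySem

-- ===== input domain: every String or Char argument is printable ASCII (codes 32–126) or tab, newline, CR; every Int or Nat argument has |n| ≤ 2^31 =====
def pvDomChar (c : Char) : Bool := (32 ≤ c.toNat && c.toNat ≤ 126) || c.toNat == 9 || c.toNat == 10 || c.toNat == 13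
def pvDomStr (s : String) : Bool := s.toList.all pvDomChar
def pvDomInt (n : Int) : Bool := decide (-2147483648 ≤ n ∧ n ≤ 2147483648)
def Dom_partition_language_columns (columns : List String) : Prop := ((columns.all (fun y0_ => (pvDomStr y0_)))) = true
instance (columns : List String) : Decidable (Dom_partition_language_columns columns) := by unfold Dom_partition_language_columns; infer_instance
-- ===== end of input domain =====

-- B replaces A's single interleaved pass (first-match-break into a mutable dict) by one filtered
-- pass per language plus a separate shared pass excluding the matched set; objective: simpler.

-- ===== PORT A =====
def pvSuffixMapA : List (String × List String) := [("en", ["_en", "_english"]), ("fr", ["_fr", "_french"])]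

-- the body of A's 'for column in columns' loop (inner for-with-break = first match in the items list)
def pvStepA (st : PySem.Dict String (List String) × List String) (column : String) :
    PySem.Dict String (List String) × List String :=
  match pvSuffixMapA.find? (fun p => p.2.any (fun suffix => PySem.Str.endswith column suffix)) with
  | some p => (st.1.modify p.1 [] (fun l => l ++ [column]), st.2)
  | none => (st.1, st.2 ++ [column])

def partition_language_columns (columns : List String) : (List (String × List String)) × List String :=
  let init : PySem.Dict String (List String) :=
    pvSuffixMapA.foldl (fun d p => d.insert p.1 []) PySem.Dict.empty
  let st := columns.foldl pvStepA (init, [])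
  (st.1.items, st.2)

-- ===== PORT B =====
def pvSuffixMapB : List (String × List String) := [("en", ["_en", "_english"]), ("fr", ["_fr", "_french"])]

def partition_language_columns_alt (columns : List String) : (List (String × List String)) × List String :=
  let lang_columns := pvSuffixMapB.map
    (fun p => (p.1, columns.filter (fun c => p.2.any (fun s => PySem.Str.endswith c s))))
  let matched : PySem.Set String := PySem.Set.ofList (lang_columns.flatMap (fun p => p.2))
  (lang_columns, columns.filter (fun c => !(PySem.Set.contains matched c)))

-- ===== PRECONDITION & SPEC =====
def Spec_partition_language_columns (columns : List String) (out : (List (String × List String)) × List String) : Prop := out = partition_language_columns_alt columns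
instance (columns : List String) (out : (List (String × List String)) × List String) : Decidable (Spec_partition_language_columns columns out) := by unfold Spec_partition_language_columns; infer_instance

-- ===== CLAIM (what is proved, stated in full; the proofs are below) =====
def Claim_equal_partition_language_columns : Prop := ∀ (columns : List String), Dom_partition_language_columns columns → Spec_partition_language_columns columns (partition_language_columns columns)

-- ===== LEMMAS AND PROOFS =====

def pvEnP (c : String) : Bool := ["_en", "_english"].any (fun s => PySem.Str.endswith c s)
def pvFrP (c : String) : Bool := ["_fr", "_french"].any (fun s => PySem.Str.endswith c s)

-- no column can match both languages: an en-suffix and an fr-suffix of the same string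
-- would have to be suffixes of one another, and none is
lemma pvDisj (c : String) (hf : pvFrP c = true) : pvEnP c = false := by
  by_contra h
  rw [Bool.not_eq_false] at h
  simp only [pvEnP, pvFrP, PySem.Str.endswith, PySem.Chars.endswith,
    List.isSuffixOf_iff_suffix, List.any_cons, List.any_nil, Bool.or_false,
    Bool.or_eq_true] at h hf
  rcases h with h | h <;> rcases hf with hf | hf <;>
    rcases List.suffix_or_suffix_of_suffix h hf with hs | hs <;> revert hs <;> decide

lemma pvFindA (c : String) :
    pvSuffixMapA.find? (fun p => p.2.any (fun s => PySem.Str.endswith c s))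
      = if pvEnP c then some ("en", ["_en", "_english"])
        else if pvFrP c then some ("fr", ["_fr", "_french"]) else none := by
  cases he : pvEnP c <;> cases hf : pvFrP c <;>
    simp only [pvEnP] at he <;> simp only [pvFrP] at hf <;>
    simp only [pvSuffixMapA, List.find?, he, hf] <;> rfl

lemma pvLoopA (cols : List String) (e f sh : List String) :
    List.foldl pvStepA (⟨[("en", e), ("fr", f)]⟩, sh) cols
      = (⟨[("en", e ++ cols.filter pvEnP), ("fr", f ++ cols.filter pvFrP)]⟩,
         sh ++ cols.filter (fun c => !(pvEnP c || pvFrP c))) := by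
  induction cols generalizing e f sh with
  | nil => simp
  | cons c cs ih =>
    simp only [List.foldl_cons, List.filter_cons]
    rw [show pvStepA (⟨[("en", e), ("fr", f)]⟩, sh) c
        = (if pvEnP c then (⟨[("en", e ++ [c]), ("fr", f)]⟩, sh)
           else if pvFrP c then (⟨[("en", e), ("fr", f ++ [c])]⟩, sh)
           else (⟨[("en", e), ("fr", f)]⟩, sh ++ [c])
           : PySem.Dict String (List String) × List String) by
      unfold pvStepA
      rw [pvFindA]
      cases he : pvEnP c <;> cases hf : pvFrP c <;>
        simp [PySem.Dict.modify, PySem.Dict.insert, PySem.Dict.getD, PySem.Dict.get?,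
          PySem.Dict.contains, List.find?]]
    by_cases he : pvEnP c = true
    · have hf : pvFrP c = false := by
        cases hfc : pvFrP c
        · rfl
        · exact absurd he (by simp [pvDisj c hfc])
      simp only [he, hf, if_true, Bool.true_or, Bool.not_true, Bool.false_eq_true,
        if_false, ih]
      simp [List.append_assoc]
    · rw [Bool.not_eq_true] at he
      by_cases hf : pvFrP c = true
      · simp only [he, hf, Bool.false_eq_true, if_false, if_true, Bool.false_or,
          Bool.not_true, ih]
        simp [List.append_assoc]
      · rw [Bool.not_eq_true] at hf
        simp only [he, hf, Bool.false_eq_true, if_false, Bool.false_or, Bool.not_false,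
          if_true, ih]
        simp [List.append_assoc]

lemma pvAltEq (columns : List String) :
    partition_language_columns_alt columns
      = ([("en", columns.filter pvEnP), ("fr", columns.filter pvFrP)],
         columns.filter (fun c => !(pvEnP c || pvFrP c))) := by
  unfold partition_language_columns_alt pvSuffixMapB
  simp only [List.map_cons, List.map_nil, List.flatMap_cons, List.flatMap_nil, List.append_nil]
  refine Prod.ext rfl ?_
  apply List.filter_congr
  intro c hc
  show (!(PySem.Set.contains (PySem.Set.ofList
      (columns.filter pvEnP ++ columns.filter pvFrP)) c)) = !(pvEnP c || pvFrP c)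
  congr 1
  by_cases h : (pvEnP c || pvFrP c) = true
  · rw [h, PySem.Set.contains_iff, PySem.Set.mem_ofList, List.mem_append]
    rcases Bool.or_eq_true_iff.mp h with h' | h'
    · exact Or.inl (List.mem_filter.mpr ⟨hc, h'⟩)
    · exact Or.inr (List.mem_filter.mpr ⟨hc, h'⟩)
  · rw [Bool.not_eq_true] at h
    rw [h, Bool.eq_false_iff]
    intro hcon
    rw [PySem.Set.contains_iff, PySem.Set.mem_ofList, List.mem_append] at hcon
    rcases hcon with h' | h' <;> have hm := (List.mem_filter.mp h').2 <;>
      rw [hm] at h <;> simp at h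

-- ===== VERDICT (by name: the statement is the Claim_ definition above) =====
theorem partition_language_columns_spec : Claim_equal_partition_language_columns := by
  intro columns _
  unfold Spec_partition_language_columns
  show ((List.foldl pvStepA (⟨[("en", []), ("fr", [])]⟩, []) columns).1.items,
        (List.foldl pvStepA (⟨[("en", []), ("fr", [])]⟩, []) columns).2)
      = partition_language_columns_alt columns
  rw [pvLoopA, pvAltEq]
  simp
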